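-- pv_equiv track=rewrite | github.com/genropy/genro-bag | src/genro_bag/builder.py | _validate_sub_tags_order
-- ===== SOURCE A (Python) =====
-- def _validate_sub_tags_order(tags: list[str], order_groups: list[set[str]]) -> bool:
--     """Check tags respect group ordering (legacy string format).
--
--     Args:
--         tags: List of tag names to validate.
--         order_groups: List of tag sets from parsing 'a,b>c,d' format.
--             Tags in earlier groups must appear before tags in later groups.
--
--     Returns:
--         True if ordering is valid, False otherwise.
--     """
--     current_group_idx = 0
--     for tag in tags:
--         tag_group_idx = None
--         for i, group in enumerate(order_groups):
--             if tag in group: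
--                 tag_group_idx = i
--                 break
--
--         if tag_group_idx is None:
--             continue
--
--         if tag_group_idx < current_group_idx:
--             return False
--
--         current_group_idx = tag_group_idx
--
--     return True
-- ===== SOURCE B (Python) =====
-- def _validate_sub_tags_order(tags: list[str], order_groups: list[set[str]]) -> bool:
--     """Inverted-index + sort: build a dict mapping each tag to the index of the
--     first group containing it (one pass over order_groups), then the ordering is
--     valid iff the sequence of group indices of the tags equals its sorted copy."""
--     pos = {}
--     for i, group in enumerate(order_groups):
--         for tag in group:
--             if tag not in pos:
--                 pos[tag] = i
--     indices = [pos[t] for t in tags if t in pos]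
--     return indices == sorted(indices)
-- ===== Notes on version B (the rewrite author's own statement) =====
-- stated objective: alternative
-- what changed: Replaces A's per-tag early-exit scan over order_groups carrying a running group index with an inverted index built once over order_groups (tag -> first containing group) followed by a sort-and-compare check (indices == sorted(indices)).
import Mathlib
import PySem

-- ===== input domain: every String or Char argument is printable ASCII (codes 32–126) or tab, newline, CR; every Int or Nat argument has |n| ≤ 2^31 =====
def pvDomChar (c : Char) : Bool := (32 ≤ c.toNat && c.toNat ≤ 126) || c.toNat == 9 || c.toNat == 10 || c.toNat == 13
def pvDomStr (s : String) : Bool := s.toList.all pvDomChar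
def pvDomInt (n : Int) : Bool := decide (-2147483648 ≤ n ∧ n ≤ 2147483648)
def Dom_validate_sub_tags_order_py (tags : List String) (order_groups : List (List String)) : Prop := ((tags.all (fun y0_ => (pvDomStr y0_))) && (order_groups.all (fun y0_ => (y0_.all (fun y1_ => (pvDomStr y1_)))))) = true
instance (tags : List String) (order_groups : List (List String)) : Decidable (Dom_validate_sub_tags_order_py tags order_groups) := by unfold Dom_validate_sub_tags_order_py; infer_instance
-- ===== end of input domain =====

-- B replaces A's per-tag early-exit scan (with a running group index) by an inverted index built
-- once over order_groups followed by a sort-and-compare check of the tags' group indices; both total.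

-- ===== PORT A =====
-- A's inner 'for i, group in enumerate(order_groups): if tag in group: … break' search
def pvFindA (tag : String) : List (List String) → Nat → Option Nat
  | [], _ => none
  | g :: rest, i => if g.contains tag then some i else pvFindA tag rest (i + 1)

-- A's outer loop carrying current_group_idx (early return False on a decrease)
def pvLoopA (order_groups : List (List String)) : List String → Nat → Bool
  | [], _ => true
  | tag :: rest, cur =>
    match pvFindA tag order_groups 0 with
    | none => pvLoopA order_groups rest cur
    | some i => if i < cur then false else pvLoopA order_groups rest i

def validate_sub_tags_order_py (tags : List String) (order_groups : List (List String)) : Bool :=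
  pvLoopA order_groups tags 0

-- ===== PORT B =====
-- B's 'for i, group in enumerate(order_groups): for tag in group: if tag not in pos: pos[tag] = i'
def pvBuildPos : List (List String) → Nat → PySem.Dict String Nat → PySem.Dict String Nat
  | [], _, d => d
  | g :: rest, i, d =>
    pvBuildPos rest (i + 1) (g.foldl (fun d t => if d.contains t then d else d.insert t i) d)

def validate_sub_tags_order_py_alt (tags : List String) (order_groups : List (List String)) : Bool :=
  let pos := pvBuildPos order_groups 0 PySem.Dict.empty
  let indices := tags.filterMap (fun t => pos.get? t)
  indices == PySem.List.sorted indices (fun x => x) false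

-- ===== PRECONDITION & SPEC =====
def Spec_validate_sub_tags_order_py (tags : List String) (order_groups : List (List String)) (out : Bool) : Prop := out = validate_sub_tags_order_py_alt tags order_groups
instance (tags : List String) (order_groups : List (List String)) (out : Bool) : Decidable (Spec_validate_sub_tags_order_py tags order_groups out) := by unfold Spec_validate_sub_tags_order_py; infer_instance

-- ===== CLAIM (what is proved, stated in full; the proofs are below) =====
def Claim_equal_validate_sub_tags_order_py : Prop := ∀ (tags : List String) (order_groups : List (List String)), Dom_validate_sub_tags_order_py tags order_groups → Spec_validate_sub_tags_order_py tags order_groups (validate_sub_tags_order_py tags order_groups)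

-- ===== LEMMAS AND PROOFS =====

-- A's loop restated as a non-decreasing check with running lower bound cur
def pvChkFrom (cur : Nat) : List Nat → Bool
  | [] => true
  | i :: r => if i < cur then false else pvChkFrom i r

-- lookup after one group's insert-if-absent fold
theorem pvInner_get? (g : List String) (i : Nat) (d : PySem.Dict String Nat) (s : String) :
    (g.foldl (fun d t => if d.contains t then d else d.insert t i) d).get? s =
      (d.get? s).or (if g.contains s then some i else none) := by
  induction g generalizing d with
  | nil => cases h : d.get? s <;> simp [h]
  | cons x rest ih =>
    simp only [List.foldl_cons]
    rw [ih]
    by_cases hc : d.contains x = true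
    · simp only [hc, if_true]
      cases h : d.get? s with
      | some v => simp
      | none =>
        have hxs : ¬ s = x := by
          intro he; subst he
          rw [PySem.Dict.contains_eq_isSome_get?, h] at hc; simp at hc
        simp [hxs]
    · simp only [hc, Bool.false_eq_true, if_false]
      by_cases hxs : s = x
      · subst hxs
        have h0 : d.get? s = none := by
          rw [PySem.Dict.contains_eq_isSome_get?] at hc
          cases h : d.get? s <;> simp [h] at hc ⊢
        rw [PySem.Dict.get?_insert_self]
        simp [h0]
      · rw [PySem.Dict.get?_insert]
        simp [hxs]

-- lookup in B's inverted index = A's first-containing-group scan (same start index)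
theorem pvBuildPos_get? (gs : List (List String)) (i : Nat) (d : PySem.Dict String Nat) (s : String) :
    (pvBuildPos gs i d).get? s = (d.get? s).or (pvFindA s gs i) := by
  induction gs generalizing i d with
  | nil => cases h : d.get? s <;> simp [pvBuildPos, pvFindA, h]
  | cons g rest ih =>
    rw [pvBuildPos, ih, pvInner_get?, Option.or_assoc]
    cases h : d.get? s with
    | some v => simp
    | none =>
      rw [Option.none_or, Option.none_or, pvFindA]
      by_cases hg : s ∈ g <;> simp [hg]

-- A's loop on the group-index list
theorem pvLoopA_eq (gs : List (List String)) (tags : List String) (cur : Nat) :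
    pvLoopA gs tags cur =
      pvChkFrom cur ((tags.map (fun t => pvFindA t gs 0)).filterMap id) := by
  induction tags generalizing cur with
  | nil => rfl
  | cons t rest ih =>
    rw [pvLoopA]
    cases h : pvFindA t gs 0 with
    | none => simp [h, ih]
    | some i =>
      simp only [h, List.map_cons, List.filterMap_cons, id]
      rw [pvChkFrom]
      by_cases hi : i < cur
      · simp [hi]
      · simp [hi, ih]

-- pvChkFrom is the chain condition
theorem pvChkFrom_iff (l : List Nat) (cur : Nat) :
    pvChkFrom cur l = true ↔ List.IsChain (fun a b => a ≤ b) (cur :: l) := by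
  induction l generalizing cur with
  | nil => simp [pvChkFrom]
  | cons i r ih =>
    rw [pvChkFrom, List.isChain_cons_cons]
    by_cases h : i < cur
    · simp [h, Nat.not_le.mpr h]
    · simp [h, Nat.le_of_not_lt h, ih]

-- ===== VERDICT (by name: the statement is the Claim_ definition above) =====
theorem validate_sub_tags_order_py_spec : Claim_equal_validate_sub_tags_order_py := by
  intro tags order_groups _
  unfold Spec_validate_sub_tags_order_py validate_sub_tags_order_py validate_sub_tags_order_py_alt
  rw [pvLoopA_eq]
  have hidx : tags.filterMap (fun t => (pvBuildPos order_groups 0 PySem.Dict.empty).get? t) =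
      (tags.map (fun t => pvFindA t order_groups 0)).filterMap id := by
    rw [List.filterMap_map]
    apply List.filterMap_congr
    intro t _
    rw [pvBuildPos_get?, PySem.Dict.get?_empty, Option.none_or]
    simp
  simp only [hidx]
  set L := (tags.map (fun t => pvFindA t order_groups 0)).filterMap id with hL
  rw [Bool.eq_iff_iff, pvChkFrom_iff, List.isChain_cons, beq_iff_eq]
  constructor
  · intro h
    have hp : L.Pairwise (fun a b => a ≤ b) := List.isChain_iff_pairwise.mp h.2
    exact (PySem.List.sorted_eq_self_of_pairwise L (fun x => x) hp).symm
  · intro h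
    have hp0 := PySem.List.sorted_pairwise L (fun x => x) (κ := Nat)
    rw [← h] at hp0
    have hp : L.Pairwise (fun a b => a ≤ b) := hp0
    exact ⟨fun y _ => Nat.zero_le y, List.isChain_iff_pairwise.mpr hp⟩
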